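-- pv_equiv track=rewrite | github.com/reter-ai/reter_code | src/reter_code/server/console_ui.py | _build_tree_lines
-- ===== SOURCE A (Python) =====
-- from typing import TYPE_CHECKING, Any, Dict, List, Optional
--
-- def _build_tree_lines(paths: List[str]) -> List[tuple]:
--     """Convert sorted flat paths into tree-rendered lines with box-drawing chars.
--
--     Returns list of (text, style) tuples.
--     """
--     # Extension → style map
--     ext_styles = {
--         ".py": "green",
--         ".pyx": "green",
--         ".pyi": "green",
--         ".js": "yellow",
--         ".ts": "yellow",
--         ".tsx": "yellow",
--         ".jsx": "yellow",
--         ".md": "dim",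
--         ".txt": "dim",
--         ".json": "cyan",
--         ".yaml": "cyan",
--         ".yml": "cyan",
--         ".toml": "cyan",
--         ".cfg": "cyan",
--         ".ini": "cyan",
--         ".html": "magenta",
--         ".css": "magenta",
--         ".scss": "magenta",
--         ".c": "blue",
--         ".cpp": "blue",
--         ".h": "blue",
--         ".hpp": "blue",
--         ".rs": "red",
--         ".go": "bright_cyan",
--         ".java": "bright_red",
--         ".cs": "bright_green",
--         ".rb": "red",
--         ".sh": "bright_yellow",
--         ".bat": "bright_yellow",
--         ".sql": "bright_blue",
--     }
--
--     if not paths: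
--         return []
--
--     # Build a nested dict representing the directory tree
--     tree: Dict[str, Any] = {}
--     for p in paths:
--         parts = p.split("/")
--         node = tree
--         for part in parts:
--             if part not in node:
--                 node[part] = {}
--             node = node[part]
--
--     # Walk the tree and produce lines
--     result: List[tuple] = []
--
--     def walk(node: dict, prefix: str, depth: int):
--         entries = sorted(node.keys(), key=lambda k: (not bool(node[k]), k.lower()))
--         for i, name in enumerate(entries):
--             is_last = (i == len(entries) - 1)
--             connector = "└── " if is_last else "├── "
--             child_prefix = prefix + ("    " if is_last else "│   ")
--
--             children = node[name]
--             if children: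
--                 # Directory
--                 result.append((f"{prefix}{connector}{name}/", "bold cyan"))
--                 walk(children, child_prefix, depth + 1)
--             else:
--                 # File — color by extension
--                 ext = ""
--                 dot_pos = name.rfind(".")
--                 if dot_pos >= 0:
--                     ext = name[dot_pos:]
--                 style = ext_styles.get(ext.lower(), "white")
--                 result.append((f"{prefix}{connector}{name}", style))
--
--     walk(tree, "  ", 0)
--     return result
-- ===== SOURCE B (Python) =====
-- from typing import Any, Dict, List
--
--
-- def _build_tree_lines(paths: List[str]) -> List[tuple]:
--     """Iterative (explicit-stack) rendering of sorted flat paths as a box-drawing tree.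
--
--     Returns list of (text, style) tuples.
--     """
--     ext_styles = {
--         ".py": "green",
--         ".pyx": "green",
--         ".pyi": "green",
--         ".js": "yellow",
--         ".ts": "yellow",
--         ".tsx": "yellow",
--         ".jsx": "yellow",
--         ".md": "dim",
--         ".txt": "dim",
--         ".json": "cyan",
--         ".yaml": "cyan",
--         ".yml": "cyan",
--         ".toml": "cyan",
--         ".cfg": "cyan",
--         ".ini": "cyan",
--         ".html": "magenta",
--         ".css": "magenta",
--         ".scss": "magenta",
--         ".c": "blue",
--         ".cpp": "blue",
--         ".h": "blue",
--         ".hpp": "blue",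
--         ".rs": "red",
--         ".go": "bright_cyan",
--         ".java": "bright_red",
--         ".cs": "bright_green",
--         ".rb": "red",
--         ".sh": "bright_yellow",
--         ".bat": "bright_yellow",
--         ".sql": "bright_blue",
--     }
--
--     if not paths:
--         return []
--
--     # Same nested-dict tree build as before (via setdefault)
--     tree: Dict[str, Any] = {}
--     for p in paths:
--         node = tree
--         for part in p.split("/"):
--             node = node.setdefault(part, {})
--
--     def sorted_items(node: dict):
--         return sorted(node.items(), key=lambda kv: (not kv[1], kv[0].lower()))
--
--     result: List[tuple] = []
--     # Explicit stack of (prefix, name, subtree, is_last); top of stack = end of list.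
--     items = sorted_items(tree)
--     stack = [("  ", name, child, i == len(items) - 1)
--              for i, (name, child) in enumerate(items)]
--     stack.reverse()
--     while stack:
--         prefix, name, child, is_last = stack.pop()
--         connector = "└── " if is_last else "├── "
--         if child:
--             result.append((prefix + connector + name + "/", "bold cyan"))
--             child_prefix = prefix + ("    " if is_last else "│   ")
--             entries = sorted_items(child)
--             n = len(entries)
--             pushed = [(child_prefix, nm, ch, j == n - 1)
--                       for j, (nm, ch) in enumerate(entries)]
--             pushed.reverse()
--             stack.extend(pushed)
--         else:
--             dot = name.rfind(".")
--             ext = name[dot:] if dot >= 0 else ""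
--             result.append((prefix + connector + name, ext_styles.get(ext.lower(), "white")))
--     return result
-- ===== Notes on version B (the rewrite author's own statement) =====
-- stated objective: alternative
-- what changed: The recursive tree walk (nested def walk with Python-recursion per directory level) is replaced by an iterative pre-order traversal over an explicit stack of (prefix, name, subtree, is_last) items, pushing each directory's sorted children in reverse so popping reproduces the exact left-to-right order; the nested-dict tree build and the sort key are unchanged.
import Mathlib
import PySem

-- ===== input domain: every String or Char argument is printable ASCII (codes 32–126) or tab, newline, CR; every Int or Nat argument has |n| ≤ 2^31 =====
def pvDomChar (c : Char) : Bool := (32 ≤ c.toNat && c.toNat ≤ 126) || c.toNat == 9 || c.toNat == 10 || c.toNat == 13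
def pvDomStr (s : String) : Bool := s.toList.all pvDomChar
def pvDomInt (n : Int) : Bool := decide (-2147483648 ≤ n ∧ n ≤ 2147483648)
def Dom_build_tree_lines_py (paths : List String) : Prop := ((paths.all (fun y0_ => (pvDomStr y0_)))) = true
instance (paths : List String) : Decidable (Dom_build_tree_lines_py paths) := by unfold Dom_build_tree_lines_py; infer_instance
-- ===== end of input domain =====

-- B replaces A's recursive tree walk by an explicit-stack pre-order traversal (same tree build,
-- same sort key, same rendered lines); an alternative decomposition, not claimed faster.

-- ===== PORT A =====
-- The nested Python dict {name: subtree} as an insertion-ordered association tree: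
-- cons name child rest = first entry (name ↦ child) followed by the remaining entries.
inductive PF where
  | nil : PF
  | cons : String → PF → PF → PF

-- node size (termination measure for the two traversals)
def PF.size : PF → Nat
  | .nil => 1
  | .cons _ c r => 1 + c.size + r.size

def PF.isEmpty : PF → Bool
  | .nil => true
  | .cons _ _ _ => false

def PF.keys : PF → List String
  | .nil => []
  | .cons n _ r => n :: r.keys

def PF.find : PF → String → PF
  | .nil, _ => .nil
  | .cons n c r, k => if n == k then c else r.find k

def PF.items : PF → List (String × PF)
  | .nil => []
  | .cons n c r => (n, c) :: r.items

-- `node = tree; for part in parts: if part not in node: node[part] = {}; node = node[part]`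
-- rendered functionally: insert the whole path, creating missing nodes (new keys append at the end).
def PF.insertPath : PF → List String → PF
  | f, [] => f
  | .nil, p :: ps => .cons p (PF.insertPath .nil ps) .nil
  | .cons n c r, p :: ps =>
    if n == p then .cons n (PF.insertPath c ps) r
    else .cons n c (PF.insertPath r (p :: ps))
termination_by f ps => (ps.length, sizeOf f)

-- extension → style map (identical literal in both Python sources)
def pvExtStyles : PySem.Dict String String :=
  PySem.Dict.ofList [(".py","green"),(".pyx","green"),(".pyi","green"),(".js","yellow"),
    (".ts","yellow"),(".tsx","yellow"),(".jsx","yellow"),(".md","dim"),(".txt","dim"),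
    (".json","cyan"),(".yaml","cyan"),(".yml","cyan"),(".toml","cyan"),(".cfg","cyan"),
    (".ini","cyan"),(".html","magenta"),(".css","magenta"),(".scss","magenta"),(".c","blue"),
    (".cpp","blue"),(".h","blue"),(".hpp","blue"),(".rs","red"),(".go","bright_cyan"),
    (".java","bright_red"),(".cs","bright_green"),(".rb","red"),(".sh","bright_yellow"),
    (".bat","bright_yellow"),(".sql","bright_blue")]

-- dot_pos = name.rfind("."); ext = name[dot_pos:] if dot_pos >= 0 else ""; ext_styles.get(ext.lower(), "white")
def pvStyleFor (name : String) : String :=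
  let dot := PySem.Str.rfind name "."
  let ext := if dot ≥ 0 then PySem.Str.slice name (some dot) none else ""
  pvExtStyles.getD (PySem.Str.lower ext) "white"

-- entries = sorted(node.keys(), key=lambda k: (not bool(node[k]), k.lower()))
def pvEntriesA (f : PF) : List String :=
  PySem.List.sorted2 f.keys (fun k => (f.find k).isEmpty) (fun k => PySem.Str.lower k)

-- termination helper for the recursive walk: a non-empty child found in f is smaller than f
lemma PF.size_find_lt (f : PF) (k : String) (h : (f.find k).isEmpty = false) :
    PF.size (f.find k) < PF.size f := by
  induction f with
  | nil => simp [PF.find, PF.isEmpty] at h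
  | cons n c r ihc ihr =>
    by_cases hk : (n == k) = true
    · simp only [PF.find, hk, if_pos] at h ⊢
      simp [PF.size]; omega
    · simp only [PF.find, hk] at h ⊢
      simp only [Bool.false_eq_true, if_false] at h ⊢
      have := ihr h
      simp [PF.size]; omega

mutual
-- def walk(node, prefix, depth): recursive pre-order emission
def pvWalkA (f : PF) (pre : String) (depth : Int) : List (String × String) :=
  pvLoopA (pvEntriesA f) 0 (pvEntriesA f).length f pre depth
termination_by (PF.size f + 1, 0)
decreasing_by
  apply Prod.Lex.left; omega

-- for i, name in enumerate(entries): …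
def pvLoopA : List String → Nat → Nat → PF → String → Int → List (String × String)
  | [], _, _, _, _, _ => []
  | name :: rest, i, total, f, pre, depth =>
    let is_last := i == total - 1
    let connector := if is_last then "└── " else "├── "
    let child_prefix := pre ++ (if is_last then "    " else "│   ")
    let children := f.find name
    if h : children.isEmpty = false then
      (pre ++ connector ++ name ++ "/", "bold cyan") ::
        (pvWalkA children child_prefix (depth + 1) ++ pvLoopA rest (i + 1) total f pre depth)
    else
      (pre ++ connector ++ name, pvStyleFor name) :: pvLoopA rest (i + 1) total f pre depth
termination_by entries _ _ f _ _ => (PF.size f, entries.length)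
decreasing_by
  · have hlt := PF.size_find_lt f name h
    rcases Nat.lt_or_ge (PF.size (f.find name) + 1) (PF.size f) with hc | hc
    · exact Prod.Lex.left _ _ hc
    · have he : PF.size (f.find name) + 1 = PF.size f := by omega
      rw [he]
      exact Prod.Lex.right _ (by simp)
  · apply Prod.Lex.right; simp
  · apply Prod.Lex.right; simp
end

def build_tree_lines_py (paths : List String) : List (String × String) :=
  if paths == [] then []    -- `if not paths: return []`
  else
    -- tree = {}; for p in paths: insert p.split("/")  ("/" ≠ "", so split? never returns none)
    let tree := paths.foldl (fun t p => t.insertPath ((PySem.Str.split? p "/").getD [])) PF.nil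
    pvWalkA tree "  " 0

-- ===== PORT B =====
-- sorted(node.items(), key=lambda kv: (not kv[1], kv[0].lower()))
def pvSortedItems (f : PF) : List (String × PF) :=
  PySem.List.sorted2 f.items (fun kv => kv.2.isEmpty) (fun kv => PySem.Str.lower kv.1)

-- [(pre, name, child, i == len(items) - 1) for i, (name, child) in enumerate(items)]
def pvMkItems (pre : String) (es : List (String × PF)) : List (String × String × PF × Bool) :=
  (PySem.List.enumerate es 0).map (fun ie => (pre, ie.2.1, ie.2.2, ie.1 == PySem.List.len es - 1))

-- termination measure for the stack loop: total size of the subtrees on the stack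
def pvStackSize : List (String × String × PF × Bool) → Nat
  | [] => 0
  | it :: rest => PF.size it.2.2.1 + pvStackSize rest

lemma pvStackSize_append (a b : List (String × String × PF × Bool)) :
    pvStackSize (a ++ b) = pvStackSize a + pvStackSize b := by
  induction a with
  | nil => simp [pvStackSize]
  | cons x t ih => simp [pvStackSize, ih]; omega

lemma pvSumChildren_lt (f : PF) : ((f.items).map (fun kv => PF.size kv.2)).sum < PF.size f := by
  induction f with
  | nil => simp [PF.items, PF.size]
  | cons n c r ihc ihr =>
    simp only [PF.items, List.map_cons, List.sum_cons]
    simp [PF.size]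
    omega

lemma pvStackSize_enumMap (pre : String) (T : Int) (es : List (String × PF)) : ∀ s : Int,
    pvStackSize ((PySem.List.enumerate es s).map (fun ie => (pre, ie.2.1, ie.2.2, ie.1 == T)))
      = (es.map (fun kv => PF.size kv.2)).sum := by
  induction es with
  | nil => intro s; simp [PySem.List.enumerate_nil, pvStackSize]
  | cons x t ih => intro s; simp [PySem.List.enumerate_cons, pvStackSize, ih]

lemma pvStackSize_push (pre : String) (f : PF) :
    pvStackSize (pvMkItems pre (pvSortedItems f)) < PF.size f := by
  unfold pvMkItems
  rw [pvStackSize_enumMap]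
  have hperm : (pvSortedItems f).Perm f.items := PySem.List.sorted2_perm _ _ _ _
  have := (hperm.map (fun kv => PF.size kv.2)).sum_eq
  rw [this]
  exact pvSumChildren_lt f

lemma PF.one_le_size (f : PF) : 1 ≤ PF.size f := by
  cases f <;> simp [PF.size] <;> omega

-- `while stack: prefix, name, child, is_last = stack.pop(); …` — the Lean list keeps the stack
-- TOP at its HEAD (the reverse of the Python list), so Python's stack.extend(reversed(pushed))
-- is the plain append `pushed ++ rest` here, and `result` is threaded exactly as in the loop.
def pvRunB : List (String × String × PF × Bool) → List (String × String) → List (String × String)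
  | [], result => result
  | (pre, name, child, is_last) :: rest, result =>
    let connector := if is_last then "└── " else "├── "
    if h : child.isEmpty = false then
      let child_prefix := pre ++ (if is_last then "    " else "│   ")
      pvRunB (pvMkItems child_prefix (pvSortedItems child) ++ rest)
        (result ++ [(pre ++ connector ++ name ++ "/", "bold cyan")])
    else
      pvRunB rest (result ++ [(pre ++ connector ++ name, pvStyleFor name)])
termination_by stack _ => pvStackSize stack
decreasing_by
  · rw [pvStackSize_append]
    have := pvStackSize_push (pre ++ (if is_last then "    " else "│   ")) child
    simp [pvStackSize]; omega
  · have := PF.one_le_size child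
    simp [pvStackSize]; omega

def build_tree_lines_py_alt (paths : List String) : List (String × String) :=
  if paths == [] then []
  else
    let tree := paths.foldl (fun t p => t.insertPath ((PySem.Str.split? p "/").getD [])) PF.nil
    pvRunB (pvMkItems "  " (pvSortedItems tree)) []

-- ===== PRECONDITION & SPEC =====
def Spec_build_tree_lines_py (paths : List String) (out : List (String × String)) : Prop := out = build_tree_lines_py_alt paths
instance (paths : List String) (out : List (String × String)) : Decidable (Spec_build_tree_lines_py paths out) := by unfold Spec_build_tree_lines_py; infer_instance

-- ===== CLAIM (what is proved, stated in full; the proofs are below) =====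
def Claim_equal_build_tree_lines_py : Prop := ∀ (paths : List String), Dom_build_tree_lines_py paths → Spec_build_tree_lines_py paths (build_tree_lines_py paths)

-- ===== LEMMAS AND PROOFS =====

-- proof-side well-formedness: a tree built by insertPath has pairwise-distinct keys at every level
def PF.member : PF → String → Bool
  | .nil, _ => false
  | .cons n _ r, k => n == k || r.member k

def pvWf : PF → Bool
  | .nil => true
  | .cons n c r => !(r.member n) && pvWf c && pvWf r

lemma pvBeq_comm (a b : String) : (a == b) = (b == a) := by
  by_cases h : a = b
  · subst h; rfl
  · have h1 : (a == b) = false := by rw [beq_eq_false_iff_ne]; exact h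
    have h2 : (b == a) = false := by rw [beq_eq_false_iff_ne]; exact fun e => h e.symm
    rw [h1, h2]

lemma pvMember_iff (f : PF) (k : String) : f.member k = true ↔ k ∈ f.keys := by
  induction f with
  | nil => simp [PF.member, PF.keys]
  | cons n c r ihc ihr =>
    simp only [PF.member, PF.keys, List.mem_cons, Bool.or_eq_true, ihr, beq_iff_eq]
    constructor
    · rintro (h | h)
      · exact Or.inl h.symm
      · exact Or.inr h
    · rintro (h | h)
      · exact Or.inl h.symm
      · exact Or.inr h

lemma pvMember_insertPath (f : PF) (p : String) (ps : List String) (k : String) :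
    (PF.insertPath f (p :: ps)).member k = (f.member k || k == p) := by
  induction f with
  | nil =>
    simp only [PF.insertPath, PF.member, Bool.or_false, Bool.false_or]
    exact pvBeq_comm p k
  | cons n c r ihc ihr =>
    by_cases hnp : n = p
    · subst hnp
      simp only [PF.insertPath, BEq.rfl, if_true, PF.member]
      by_cases hk : k = n
      · subst hk; simp
      · have hkn : (k == n) = false := by rw [beq_eq_false_iff_ne]; exact hk
        simp [hkn]
    · have hb : (n == p) = false := by rw [beq_eq_false_iff_ne]; exact hnp
      simp only [PF.insertPath, hb, Bool.false_eq_true, if_false, PF.member, ihr,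
        Bool.or_assoc]

lemma pvWf_insertPath (f : PF) (ps : List String) (h : pvWf f = true) :
    pvWf (PF.insertPath f ps) = true := by
  induction ps generalizing f with
  | nil => simpa [PF.insertPath] using h
  | cons p ps ih =>
    revert h
    induction f with
    | nil =>
      intro _
      simp only [PF.insertPath]
      simp [pvWf, PF.member, ih PF.nil rfl]
    | cons n c r ihc ihr =>
      intro h
      simp only [pvWf, Bool.and_eq_true, Bool.not_eq_true'] at h
      obtain ⟨⟨h1, h2⟩, h3⟩ := h
      by_cases hnp : n = p
      · subst hnp
        simp only [PF.insertPath, BEq.rfl, if_true]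
        simp [pvWf, h1, h3, ih c h2]
      · have hb : (n == p) = false := by rw [beq_eq_false_iff_ne]; exact hnp
        simp only [PF.insertPath, hb, Bool.false_eq_true, if_false]
        simp only [pvWf, Bool.and_eq_true, Bool.not_eq_true']
        refine ⟨⟨?_, h2⟩, ihr (by simp [pvWf, h3])⟩
        rw [pvMember_insertPath, h1]
        simpa using hnp

lemma pvWf_find (f : PF) (k : String) (h : pvWf f = true) : pvWf (f.find k) = true := by
  induction f with
  | nil => rfl
  | cons n c r ihc ihr =>
    simp only [pvWf, Bool.and_eq_true, Bool.not_eq_true'] at h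
    obtain ⟨⟨h1, h2⟩, h3⟩ := h
    by_cases hk : (n == k) = true
    · simp only [PF.find, hk, if_true]; exact h2
    · simp only [PF.find, hk, Bool.false_eq_true, if_false]; exact ihr h3

lemma pvItems_eq (f : PF) (h : pvWf f = true) :
    f.items = f.keys.map (fun k => (k, f.find k)) := by
  induction f with
  | nil => rfl
  | cons n c r ihc ihr =>
    simp only [pvWf, Bool.and_eq_true, Bool.not_eq_true'] at h
    obtain ⟨⟨h1, h2⟩, h3⟩ := h
    simp only [PF.items, PF.keys, List.map_cons, PF.find, BEq.rfl, if_true]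
    refine List.cons_eq_cons.mpr ⟨rfl, ?_⟩
    rw [ihr h3]
    apply List.map_congr_left
    intro k hk
    have hkn : k ≠ n := by
      intro hkn
      subst hkn
      exact absurd ((pvMember_iff r k).2 hk) (by simp [h1])
    have hne : (n == k) = false := by rw [beq_eq_false_iff_ne]; exact hkn.symm
    simp [PF.find, hne]

lemma pvInsertBy_map {α β : Type} (g : α → β) (bf : β → β → Bool) (x : α) :
    ∀ ys : List α,
    PySem.List.insertBy bf (g x) (ys.map g)
      = (PySem.List.insertBy (fun a b => bf (g a) (g b)) x ys).map g := by
  intro ys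
  induction ys with
  | nil => rfl
  | cons y t ih =>
    simp only [List.map_cons, PySem.List.insertBy]
    by_cases hb : bf (g x) (g y) = true <;> simp [hb, ih]

lemma pvFoldl_insertBy_map {α β : Type} (g : α → β) (bf : β → β → Bool) :
    ∀ (xs : List α) (acc : List α),
    xs.foldl (fun a x => PySem.List.insertBy bf (g x) a) (acc.map g)
      = (xs.foldl (fun a x => PySem.List.insertBy (fun u v => bf (g u) (g v)) x a) acc).map g := by
  intro xs
  induction xs with
  | nil => intro acc; rfl
  | cons x t ih =>
    intro acc
    simp only [List.foldl_cons]
    rw [pvInsertBy_map g bf x acc]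
    exact ih _

lemma pvSorted2_map {α β κ₁ κ₂ : Type} [LT κ₁] [DecidableLT κ₁] [LT κ₂] [DecidableLT κ₂]
    (g : α → β) (xs : List α) (k1 : β → κ₁) (k2 : β → κ₂) :
    PySem.List.sorted2 (xs.map g) k1 k2
      = (PySem.List.sorted2 xs (fun a => k1 (g a)) (fun a => k2 (g a))).map g := by
  show (xs.map g).foldl
      (fun acc x => PySem.List.insertBy
        (fun a b => decide (k1 a < k1 b) || (!decide (k1 b < k1 a) && decide (k2 a < k2 b))) x acc) []
    = (xs.foldl
      (fun acc x => PySem.List.insertBy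
        (fun a b => decide (k1 (g a) < k1 (g b)) || (!decide (k1 (g b) < k1 (g a)) && decide (k2 (g a) < k2 (g b)))) x acc) []).map g
  rw [List.foldl_map]
  exact pvFoldl_insertBy_map g _ xs []

lemma pvSortedItems_eq (f : PF) (h : pvWf f = true) :
    pvSortedItems f = (pvEntriesA f).map (fun k => (k, f.find k)) := by
  unfold pvSortedItems
  rw [pvItems_eq f h]
  exact pvSorted2_map (fun k => (k, f.find k)) f.keys _ _

-- the stack items produced for a directory, with explicit running index and last-index
def pvItemsAux (pre : String) (f : PF) : List String → Int → Int → List (String × String × PF × Bool)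
  | [], _, _ => []
  | k :: t, i, T => (pre, k, f.find k, i == T) :: pvItemsAux pre f t (i + 1) T

lemma pvMkItems_aux (pre : String) (f : PF) (ks : List String) (T : Int) : ∀ s : Int,
    ((PySem.List.enumerate (ks.map (fun k => (k, f.find k))) s).map
        (fun ie => (pre, ie.2.1, ie.2.2, ie.1 == T)))
      = pvItemsAux pre f ks s T := by
  induction ks with
  | nil => intro s; simp [PySem.List.enumerate_nil, pvItemsAux]
  | cons k t ih =>
    intro s
    simp only [List.map_cons, PySem.List.enumerate_cons, List.map, pvItemsAux, ih]

lemma pvMkItems_eq (pre : String) (f : PF) (h : pvWf f = true) :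
    pvMkItems pre (pvSortedItems f)
      = pvItemsAux pre f (pvEntriesA f) 0 (((pvEntriesA f).length : Int) - 1) := by
  unfold pvMkItems
  rw [pvSortedItems_eq f h]
  have hlen : PySem.List.len ((pvEntriesA f).map (fun k => (k, f.find k)))
      = ((pvEntriesA f).length : Int) := by
    simp [PySem.List.len_eq]
  rw [hlen, pvMkItems_aux]

lemma pvInner (f : PF) (hwf : pvWf f = true)
    (IH : ∀ c : PF, PF.size c < PF.size f → pvWf c = true → ∀ pre d rest res,
      pvRunB (pvMkItems pre (pvSortedItems c) ++ rest) res = pvRunB rest (res ++ pvWalkA c pre d)) :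
    ∀ (ks : List String) (i total : Nat), total = i + ks.length →
    ∀ pre d rest res,
    pvRunB (pvItemsAux pre f ks (i : Int) (((total : Nat) : Int) - 1) ++ rest) res
      = pvRunB rest (res ++ pvLoopA ks i total f pre d) := by
  intro ks
  induction ks with
  | nil =>
    intro i total ht pre d rest res
    simp [pvItemsAux, pvLoopA]
  | cons k t ih =>
    intro i total ht pre d rest res
    have htot : 1 ≤ total := by simp only [List.length_cons] at ht; omega
    have hflag : (((i : Nat) : Int) == ((total : Nat) : Int) - 1) = (i == total - 1) := by
      by_cases hc : i = total - 1
      · have h1 : ((i : Nat) : Int) = ((total : Nat) : Int) - 1 := by omega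
        have h2 : (i == total - 1) = true := by simp [hc]
        simp [h1, h2]
      · have h1 : ¬ (((i : Nat) : Int) = ((total : Nat) : Int) - 1) := by omega
        have h2 : (i == total - 1) = false := by simp [hc]
        simp [h1, h2]
    simp only [pvItemsAux, List.cons_append]
    rw [hflag]
    simp only [pvRunB, pvLoopA]
    by_cases hch : (f.find k).isEmpty = false
    · simp only [hch, dite_true, if_true, dif_pos]
      rw [IH (f.find k) (PF.size_find_lt f k hch) (pvWf_find f k hwf)
          (pre ++ (if (i == total - 1) = true then "    " else "│   ")) (d + 1)]
      have hcast : ((i : Nat) : Int) + 1 = (((i + 1 : Nat)) : Int) := by push_cast; ring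
      rw [hcast, ih (i + 1) total (by simp only [List.length_cons] at ht ⊢; omega) pre d]
      simp [List.append_assoc]
    · simp only [hch, dite_false, if_false, dif_neg, Bool.not_eq_false]
      have hcast : ((i : Nat) : Int) + 1 = (((i + 1 : Nat)) : Int) := by push_cast; ring
      rw [hcast, ih (i + 1) total (by simp only [List.length_cons] at ht ⊢; omega) pre d]
      simp [List.append_assoc]

lemma pvMain : ∀ (N : Nat) (f : PF), PF.size f < N → pvWf f = true →
    ∀ pre d rest res,
    pvRunB (pvMkItems pre (pvSortedItems f) ++ rest) res = pvRunB rest (res ++ pvWalkA f pre d) := by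
  intro N
  induction N with
  | zero => intro f hf; omega
  | succ N ihN =>
    intro f hf hwf pre d rest res
    rw [pvMkItems_eq pre f hwf]
    have := pvInner f hwf (fun c hc hwc => ihN c (by omega) hwc)
      (pvEntriesA f) 0 (pvEntriesA f).length (by omega) pre d rest res
    simpa [pvWalkA, Nat.cast_zero] using this

lemma pvWf_foldl (ps : List String) : ∀ acc : PF, pvWf acc = true →
    pvWf (ps.foldl (fun t p => t.insertPath ((PySem.Str.split? p "/").getD [])) acc) = true := by
  induction ps with
  | nil => intro acc h; simpa using h
  | cons p ps ih =>
    intro acc h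
    simp only [List.foldl_cons]
    exact ih _ (pvWf_insertPath _ _ h)

-- ===== VERDICT (by name: the statement is the Claim_ definition above) =====
theorem build_tree_lines_py_spec : Claim_equal_build_tree_lines_py := by
  intro paths _
  unfold Spec_build_tree_lines_py build_tree_lines_py build_tree_lines_py_alt
  by_cases hp : (paths == []) = true
  · rw [if_pos hp, if_pos hp]
  · rw [if_neg hp, if_neg hp]
    have hwf := pvWf_foldl paths PF.nil rfl
    have h := pvMain (PF.size (paths.foldl (fun t p => t.insertPath ((PySem.Str.split? p "/").getD [])) PF.nil) + 1)
      (paths.foldl (fun t p => t.insertPath ((PySem.Str.split? p "/").getD [])) PF.nil)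
      (by omega) hwf "  " 0 [] []
    simpa [pvRunB] using h.symm
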